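-- pv_equiv track=rewrite | github.com/apulijala/python-crash-course | codility/lesson3/find_missing_eleemnt.py | frog_river_one
-- ===== SOURCE A (Python) =====
-- def frog_river_one(X, A):
--
--     Y = X + 1
--     found = {}
--     for i in range(1,Y):
--         try:
--             found[i] = A.index(i)
--         except ValueError:
--             return -1
--     return max(found.values())
-- ===== SOURCE B (Python) =====
-- def frog_river_one(X, A):
--     need = X
--     seen = set()
--     for i, v in enumerate(A):
--         if 1 <= v <= X and v not in seen:
--             seen.add(v)
--             need -= 1
--             if need == 0:
--                 return i
--     return -1
-- ===== Notes on version B (the rewrite author's own statement) =====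
-- stated objective: alternative
-- what changed: Instead of running A.index(i) for every leaf i in 1..X and taking the max of the found positions, B makes a single pass over A with a set of distinct in-range values seen and a countdown, returning the index at which the count of distinct leaves reaches X.
import Mathlib
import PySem

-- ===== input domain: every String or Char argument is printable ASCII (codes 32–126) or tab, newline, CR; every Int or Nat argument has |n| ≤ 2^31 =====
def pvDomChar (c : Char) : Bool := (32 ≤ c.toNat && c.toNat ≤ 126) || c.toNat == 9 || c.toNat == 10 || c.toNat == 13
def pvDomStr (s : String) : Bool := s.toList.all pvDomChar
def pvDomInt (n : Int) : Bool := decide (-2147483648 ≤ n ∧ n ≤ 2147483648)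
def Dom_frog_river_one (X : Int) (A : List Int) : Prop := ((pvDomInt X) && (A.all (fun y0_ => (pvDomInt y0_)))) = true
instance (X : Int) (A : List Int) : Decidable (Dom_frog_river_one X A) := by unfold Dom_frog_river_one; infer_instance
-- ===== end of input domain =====

-- B replaces A's per-leaf A.index scans with a single pass over A counting distinct in-range values (alternative algorithm); for X ≤ 0 A raises ValueError, excluded by Pre_.


-- ===== PORT A =====
-- A's loop 'for i in range(1, Y): found[i] = A.index(i)' with the early 'return -1' on ValueError;
-- the loop counter is recursed on directly (Python's range is lazy)
def frogA_go (A : List Int) (Y : Int) (i : Int) (found : PySem.Dict Int Int) : Option (PySem.Dict Int Int) :=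
  if i < Y then
    match PySem.List.index? A i with
    | some idx => frogA_go A Y (i + 1) (found.insert i (idx : Int))
    | none => none
  else some found
termination_by (Y - i).toNat
decreasing_by omega

def frog_river_one (X : Int) (A : List Int) : Int :=
  -- Y = X + 1 written inline
  match frogA_go A (X + 1) 1 PySem.Dict.empty with
  | none => -1
  | some found => (PySem.List.max? found.values (fun y => y)).getD 0
      -- max() on an empty values list raises ValueError in Python; Pre_ (1 ≤ X) excludes that

-- ===== PORT B =====
def frogB_go (X : Int) : List (Int × Int) → Int → PySem.Set Int → Int
  | [], _, _ => -1
  | (i, v) :: rest, need, seen =>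
      if 1 ≤ v ∧ v ≤ X ∧ v ∉ seen then
        if need - 1 = 0 then i
        else frogB_go X rest (need - 1) (PySem.Set.add seen v)
      else frogB_go X rest need seen

def frog_river_one_alt (X : Int) (A : List Int) : Int :=
  frogB_go X (PySem.List.enumerate A 0) X PySem.Set.empty

-- ===== PRECONDITION & SPEC =====
-- Pre_ excludes X ≤ 0, where A raises ValueError (max() of an empty sequence).
def Pre_frog_river_one (X : Int) (A : List Int) : Prop := 1 ≤ X
instance (X : Int) (A : List Int) : Decidable (Pre_frog_river_one X A) := by unfold Pre_frog_river_one; infer_instance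
def pvWitness_frog_river_one : Int × List Int := (2, [1, 3, 1, 4, 2, 3, 5, 4])

def Spec_frog_river_one (X : Int) (A : List Int) (out : Int) : Prop := out = frog_river_one_alt X A
instance (X : Int) (A : List Int) (out : Int) : Decidable (Spec_frog_river_one X A out) := by unfold Spec_frog_river_one; infer_instance

-- ===== CLAIM (what is proved, stated in full; the proofs are below) =====
def Claim_equal_frog_river_one : Prop := ∀ (X : Int) (A : List Int), Dom_frog_river_one X A → Pre_frog_river_one X A → Spec_frog_river_one X A (frog_river_one X A)

-- ===== LEMMAS AND PROOFS =====

-- the common value both programs compute: -1 if some leaf 1..X is missing, else the max first-index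
def frogSpec (X : Int) (A : List Int) : Int :=
  if ∀ v ∈ PySem.List.pyRange 1 (X + 1) 1, v ∈ A then
    match (PySem.List.pyRange 1 (X + 1) 1).map (fun v => ((A.idxOf v : Nat) : Int)) with
    | [] => -1
    | m :: t => t.foldl max m
  else -1

theorem goA_none_iff (A : List Int) (Y : Int) (i : Int) (found : PySem.Dict Int Int) :
    frogA_go A Y i found = none ↔ ∃ j ∈ PySem.List.pyRange i Y 1, j ∉ A := by
  induction i, found using frogA_go.induct A Y with
  | case1 i found hlt idx hidx ih =>
      have hi : i ∈ A := (PySem.List.index?_isSome_iff A i).mp (by rw [hidx]; rfl)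
      rw [frogA_go, if_pos hlt, hidx, ih, PySem.List.pyRange_one_cons hlt]
      simp [hi]
  | case2 i found hlt hidx =>
      have hi : i ∉ A := (PySem.List.index?_eq_none_iff A i).mp hidx
      rw [frogA_go, if_pos hlt, hidx, PySem.List.pyRange_one_cons hlt]
      simp [hi]
  | case3 i found hlt =>
      rw [frogA_go, if_neg hlt, PySem.List.pyRange_one_eq_nil (by omega)]
      simp

theorem goA_values (A : List Int) (Y : Int) (i : Int) (found : PySem.Dict Int Int) :
    ∀ d : PySem.Dict Int Int,
      (∀ j ∈ PySem.List.pyRange i Y 1, found.contains j = false) →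
      frogA_go A Y i found = some d →
      d.values = found.values ++ (PySem.List.pyRange i Y 1).map (fun v => ((A.idxOf v : Nat) : Int)) := by
  induction i, found using frogA_go.induct A Y with
  | case1 i found hlt idx hidx ih =>
      intro d hfresh h
      rw [frogA_go, if_pos hlt, hidx] at h
      have hifresh : found.contains i = false :=
        hfresh i (PySem.List.mem_pyRange_one.mpr ⟨le_refl i, hlt⟩)
      have hitems : (found.insert i (idx : Int)).items = found.items ++ [(i, (idx : Int))] :=
        PySem.Dict.items_insert_of_not_contains found _ hifresh
      have hvals : (found.insert i (idx : Int)).values = found.values ++ [(idx : Int)] := by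
        simp [PySem.Dict.values, hitems]
      have hfresh' : ∀ j ∈ PySem.List.pyRange (i + 1) Y 1, (found.insert i (idx : Int)).contains j = false := by
        intro j hj
        have hjr := PySem.List.mem_pyRange_one.mp hj
        rw [PySem.Dict.contains_insert]
        have hne : j ≠ i := by omega
        have : (j == i) = false := by simp [hne]
        rw [this, Bool.false_or]
        exact hfresh j (PySem.List.mem_pyRange_one.mpr ⟨by omega, hjr.2⟩)
      have := ih d hfresh' h
      rw [this, hvals, PySem.List.pyRange_one_cons hlt]
      have hxi : A.idxOf i = idx := by
        rw [PySem.List.index?_eq_idxOf?] at hidx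
        rw [List.idxOf_eq_getD_idxOf?, hidx]; rfl
      simp [hxi]
  | case2 i found hlt hidx =>
      intro d hfresh h
      rw [frogA_go, if_pos hlt, hidx] at h
      exact absurd h (by simp)
  | case3 i found hlt =>
      intro d hfresh h
      rw [frogA_go, if_neg hlt] at h
      rw [PySem.List.pyRange_one_eq_nil (by omega)]
      simp only [List.map_nil, List.append_nil]
      cases h
      rfl

theorem portA_eq_spec (X : Int) (A : List Int) (hX : 1 ≤ X) :
    frog_river_one X A = frogSpec X A := by
  unfold frog_river_one frogSpec
  by_cases hcov : ∀ v ∈ PySem.List.pyRange 1 (X + 1) 1, v ∈ A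
  · cases hgo : frogA_go A (X + 1) 1 PySem.Dict.empty with
    | none =>
        exfalso
        obtain ⟨i, hi, hnot⟩ := (goA_none_iff A (X + 1) 1 PySem.Dict.empty).mp hgo
        exact hnot (hcov i hi)
    | some d =>
        have hvals := goA_values A (X + 1) 1 PySem.Dict.empty d (by intro j _; rfl) hgo
        have hemp : (PySem.Dict.empty : PySem.Dict Int Int).values = [] := rfl
        rw [hemp, List.nil_append] at hvals
        have hcons : PySem.List.pyRange 1 (X + 1) 1 = 1 :: PySem.List.pyRange 2 (X + 1) 1 := by
          have := PySem.List.pyRange_one_cons (a := 1) (b := X + 1) (by omega)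
          simpa using this
        rw [if_pos hcov]
        rw [hcons] at hvals ⊢
        simp only [List.map_cons] at hvals ⊢
        rw [hvals, PySem.List.max?_id_cons]
        rfl
  · have hgo : frogA_go A (X + 1) 1 PySem.Dict.empty = none := by
      rw [goA_none_iff]
      push_neg at hcov
      obtain ⟨i, hi, hni⟩ := hcov
      exact ⟨i, hi, hni⟩
    rw [hgo, if_neg hcov]

-- B-side: invariant proof over the suffix
theorem goB_spec (X : Int) (hX : 1 ≤ X) :
    ∀ (suf pre : List Int) (seen : PySem.Set Int) (need : Int),
      (∀ v, v ∈ seen ↔ (1 ≤ v ∧ v ≤ X ∧ v ∈ pre)) →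
      seen.Nodup →
      need = X - seen.length →
      (seen.length : Int) < X →
      frogB_go X (PySem.List.enumerate suf pre.length) need seen = frogSpec X (pre ++ suf) := by
  intro suf
  induction suf with
  | nil =>
      intro pre seen need hinv hnd hneed hlen
      have hncov : ¬ ∀ v ∈ PySem.List.pyRange 1 (X + 1) 1, v ∈ pre ++ [] := by
        intro hcov
        have hsub : PySem.List.pyRange 1 (X + 1) 1 ⊆ seen := by
          intro v hv
          have hr := (PySem.List.mem_pyRange_one).mp hv
          exact (hinv v).mpr ⟨hr.1, by omega, by simpa using hcov v hv⟩
        have hlenR : (PySem.List.pyRange 1 (X + 1) 1).length = X.toNat := by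
          rw [PySem.List.length_pyRange_one]; omega
        have := (List.subperm_of_subset (PySem.List.nodup_pyRange_one 1 (X + 1)) hsub).length_le
        omega
      simp only [PySem.List.enumerate_nil, frogB_go, frogSpec]
      rw [if_neg hncov]
  | cons a rest ih =>
      intro pre seen need hinv hnd hneed hlen
      rw [PySem.List.enumerate_cons]
      simp only [frogB_go]
      by_cases hc : 1 ≤ a ∧ a ≤ X ∧ a ∉ seen
      · rw [if_pos hc]
        obtain ⟨ha1, haX, hans⟩ := hc
        have hadd : PySem.Set.add seen a = seen ++ [a] := by
          unfold PySem.Set.add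
          rw [if_neg]
          simp at *; exact hans
        have hinv' : ∀ v, v ∈ PySem.Set.add seen a ↔ (1 ≤ v ∧ v ≤ X ∧ v ∈ pre ++ [a]) := by
          intro v
          rw [hadd]
          simp only [List.mem_append, List.mem_singleton]
          constructor
          · rintro (hv | rfl)
            · have := (hinv v).mp hv; tauto
            · exact ⟨ha1, haX, Or.inr rfl⟩
          · rintro ⟨h1, h2, hv | rfl⟩
            · exact Or.inl ((hinv v).mpr ⟨h1, h2, hv⟩)
            · exact Or.inr rfl
        have hnd' : (PySem.Set.add seen a).Nodup := by
          rw [hadd]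
          simpa [List.nodup_append] using ⟨hnd, fun x hx h => hans (h ▸ hx)⟩
        have hlen' : (PySem.Set.add seen a).length = seen.length + 1 := by
          rw [hadd]; simp
        by_cases hz : need - 1 = 0
        · rw [if_pos hz]
          -- the counter hit zero: every leaf 1..X is covered by pre ++ [a]
          have hXlen : X = (seen.length : Int) + 1 := by omega
          have hallmem : ∀ v ∈ PySem.List.pyRange 1 (X + 1) 1, v ∈ pre ++ [a] := by
            have hsub : PySem.Set.add seen a ⊆ PySem.List.pyRange 1 (X + 1) 1 := by
              intro v hv
              have := (hinv' v).mp hv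
              rw [PySem.List.mem_pyRange_one]
              omega
            have hlenR : (PySem.List.pyRange 1 (X + 1) 1).length ≤ (PySem.Set.add seen a).length := by
              rw [PySem.List.length_pyRange_one, hlen']; omega
            have hperm := (List.subperm_of_subset hnd' hsub).perm_of_length_le hlenR
            intro v hv
            exact ((hinv' v).mp (hperm.mem_iff.mpr hv)).2.2
          have hcov : ∀ v ∈ PySem.List.pyRange 1 (X + 1) 1, v ∈ pre ++ a :: rest := by
            intro v hv
            have := hallmem v hv
            simp only [List.mem_append, List.mem_singleton] at this
            rcases this with h | rfl
            · exact List.mem_append.mpr (Or.inl h)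
            · simp
          -- every first index is ≤ pre.length, and a attains it
          have hap : a ∉ pre := fun hp => hans ((hinv a).mpr ⟨ha1, haX, hp⟩)
          have haidx : (pre ++ a :: rest).idxOf a = pre.length := by
            rw [List.idxOf_eq_getD_idxOf?, ← PySem.List.index?_eq_idxOf?]
            rw [(PySem.List.index?_eq_some_iff _ _ _).mpr ⟨pre, rest, rfl, rfl, hap⟩]; rfl
          have hle : ∀ v ∈ PySem.List.pyRange 1 (X + 1) 1,
              (((pre ++ a :: rest).idxOf v : Nat) : Int) ≤ (pre.length : Int) := by
            intro v hv
            have := hallmem v hv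
            simp only [List.mem_append, List.mem_singleton] at this
            rcases this with h | rfl
            · have : (pre ++ a :: rest).idxOf v = pre.idxOf v := List.idxOf_append_of_mem h
              rw [this]
              exact_mod_cast Int.ofNat_le.mpr (List.idxOf_lt_length_of_mem h).le
            · rw [haidx]
          unfold frogSpec
          rw [if_pos hcov]
          have hcons : PySem.List.pyRange 1 (X + 1) 1 = 1 :: PySem.List.pyRange 2 (X + 1) 1 := by
            have := PySem.List.pyRange_one_cons (a := 1) (b := X + 1) (by omega)
            simpa using this
          rw [hcons]
          simp only [List.map_cons]
          -- the fold of the mapped list equals pre.length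
          have hmem : ((pre.length : Nat) : Int) ∈
              (1 :: PySem.List.pyRange 2 (X + 1) 1).map (fun v => (((pre ++ a :: rest).idxOf v : Nat) : Int)) := by
            rw [← hcons]
            exact List.mem_map.mpr ⟨a, PySem.List.mem_pyRange_one.mpr ⟨ha1, by omega⟩, by rw [haidx]⟩
          have hleall : ∀ y ∈ (1 :: PySem.List.pyRange 2 (X + 1) 1).map
              (fun v => (((pre ++ a :: rest).idxOf v : Nat) : Int)), y ≤ (pre.length : Int) := by
            rw [← hcons]
            intro y hy
            obtain ⟨v, hv, rfl⟩ := List.mem_map.mp hy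
            exact hle v hv
          simp only [List.map_cons] at hmem hleall
          set m := (((pre ++ a :: rest).idxOf 1 : Nat) : Int) with hm
          set t := (PySem.List.pyRange 2 (X + 1) 1).map (fun v => (((pre ++ a :: rest).idxOf v : Nat) : Int)) with ht
          have h1 := PySem.List.le_foldl_max t m
          have h2 := PySem.List.foldl_max_mem t m
          have hfle : t.foldl max m ≤ (pre.length : Int) := by
            rcases h2 with h | h
            · rw [h]; exact hleall m (by simp)
            · exact hleall _ (by simp [h])
          have hfge : (pre.length : Int) ≤ t.foldl max m := by
            rcases List.mem_cons.mp hmem with h | h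
            · rw [h]; exact h1.1
            · exact h1.2 _ h
          omega
        · rw [if_neg hz]
          have := ih (pre ++ [a]) (PySem.Set.add seen a) (need - 1) hinv' hnd'
            (by rw [hlen']; push_cast; omega)
            (by rw [hlen']; push_cast; omega)
          rw [List.append_assoc] at this
          simp only [List.singleton_append] at this
          simp only [List.length_append, List.length_singleton] at this
          push_cast at this
          exact this
      · rw [if_neg hc]
        have hinv' : ∀ v, v ∈ seen ↔ (1 ≤ v ∧ v ≤ X ∧ v ∈ pre ++ [a]) := by
          intro v
          simp only [List.mem_append, List.mem_singleton]
          constructor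
          · intro hv
            have := (hinv v).mp hv
            tauto
          · rintro ⟨h1, h2, hv | rfl⟩
            · exact (hinv v).mpr ⟨h1, h2, hv⟩
            · by_contra hns
              exact hc ⟨h1, h2, hns⟩
        have := ih (pre ++ [a]) seen need hinv' hnd hneed hlen
        rw [List.append_assoc] at this
        simp only [List.singleton_append] at this
        simp only [List.length_append, List.length_singleton] at this
        push_cast at this
        exact this

theorem portB_eq_spec (X : Int) (A : List Int) (hX : 1 ≤ X) :
    frog_river_one_alt X A = frogSpec X A := by
  unfold frog_river_one_alt
  have := goB_spec X hX A [] PySem.Set.empty X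
    (by intro v; simp [PySem.Set.empty]) (by simp [PySem.Set.empty])
    (by simp [PySem.Set.empty]) (by simpa [PySem.Set.empty] using hX)
  simpa using this

-- ===== VERDICT (by name: the statement is the Claim_ definition above) =====
theorem frog_river_one_spec : Claim_equal_frog_river_one := by
  intro X A _ hpre
  unfold Spec_frog_river_one
  rw [portA_eq_spec X A hpre, portB_eq_spec X A hpre]
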